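-- pv_equiv track=rewrite | github.com/thienbao2507/BTV | backend/core/views_admin.py | _find_duplicate_ma_email
-- ===== SOURCE A (Python) =====
-- def _find_duplicate_ma_email(rows, key_ma="maNV", key_email="email"):
--     seen_ma, seen_email = set(), set()
--     dup_ma, dup_email = set(), set()
--     for r in rows:
--         ma = (r.get(key_ma) or "").strip()
--         if ma:
--             if ma in seen_ma:
--                 dup_ma.add(ma)
--             else:
--                 seen_ma.add(ma)
--         email = (r.get(key_email) or "").strip().lower()
--         if email:
--             if email in seen_email:
--                 dup_email.add(email)
--             else:
--                 seen_email.add(email)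
--     return dup_ma, dup_email
-- ===== SOURCE B (Python) =====
-- def _find_duplicate_ma_email(rows, key_ma="maNV", key_email="email"):
--     mas = [m for m in ((r.get(key_ma) or "").strip() for r in rows) if m]
--     emails = [e for e in ((r.get(key_email) or "").strip().lower() for r in rows) if e]
--
--     def prior_dups(vals):
--         return {v for i, v in enumerate(vals) if v in vals[:i]}
--
--     return prior_dups(mas), prior_dups(emails)
-- ===== Notes on version B (the rewrite author's own statement) =====
-- stated objective: alternative
-- what changed: A's single interleaved pass with two seen-sets and two dup-sets is replaced by a two-phase pipeline: first extract the two normalized non-empty value lists, then build each duplicate set with a set comprehension over enumerate that keeps a value iff it already occurs in the prefix before it.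
import Mathlib
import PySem

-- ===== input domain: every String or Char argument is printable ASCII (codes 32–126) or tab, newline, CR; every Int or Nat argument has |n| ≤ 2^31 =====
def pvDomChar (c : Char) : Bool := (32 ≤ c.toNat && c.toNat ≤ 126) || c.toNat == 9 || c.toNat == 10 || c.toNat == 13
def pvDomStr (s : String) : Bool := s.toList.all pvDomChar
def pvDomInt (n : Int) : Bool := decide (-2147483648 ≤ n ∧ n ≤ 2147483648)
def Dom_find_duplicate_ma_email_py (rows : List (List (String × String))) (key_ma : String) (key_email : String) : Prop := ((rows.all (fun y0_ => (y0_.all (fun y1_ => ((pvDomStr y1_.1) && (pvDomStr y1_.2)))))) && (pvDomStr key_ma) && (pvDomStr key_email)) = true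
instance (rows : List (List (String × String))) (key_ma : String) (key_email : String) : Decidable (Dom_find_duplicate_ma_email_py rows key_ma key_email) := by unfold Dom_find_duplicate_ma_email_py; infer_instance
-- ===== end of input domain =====

-- B replaces A's interleaved seen/dup pass by a two-phase pipeline (extract the normalized value
-- lists, then a prior-occurrence set comprehension per list); alternative decomposition, not faster.

-- ===== PORT A =====
-- loop body of A's 'for r in rows'; state = (seen_ma, seen_email, dup_ma, dup_email)
def pvStepA (key_ma key_email : String)
    (st : PySem.Set String × PySem.Set String × PySem.Set String × PySem.Set String)
    (r : List (String × String)) :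
    PySem.Set String × PySem.Set String × PySem.Set String × PySem.Set String :=
  let seen_ma := st.1; let seen_email := st.2.1; let dup_ma := st.2.2.1; let dup_email := st.2.2.2
  let ma := PySem.Str.strip (PySem.Dict.getD (PySem.Dict.mk r) key_ma "")
  let p1 :=
    if ma ≠ "" then
      (if PySem.Set.contains seen_ma ma then (seen_ma, PySem.Set.add dup_ma ma)
       else (PySem.Set.add seen_ma ma, dup_ma))
    else (seen_ma, dup_ma)
  let email := PySem.Str.lower (PySem.Str.strip (PySem.Dict.getD (PySem.Dict.mk r) key_email ""))
  let p2 :=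
    if email ≠ "" then
      (if PySem.Set.contains seen_email email then (seen_email, PySem.Set.add dup_email email)
       else (PySem.Set.add seen_email email, dup_email))
    else (seen_email, dup_email)
  (p1.1, p2.1, p1.2, p2.2)

def find_duplicate_ma_email_py (rows : List (List (String × String))) (key_ma : String) (key_email : String) : List String × List String :=
  let st := rows.foldl (pvStepA key_ma key_email) (PySem.Set.empty, PySem.Set.empty, PySem.Set.empty, PySem.Set.empty)
  (st.2.2.1, st.2.2.2)

-- ===== PORT B =====
-- {v for i, v in enumerate(vals) if v in vals[:i]}
def pvPriorDups (vals : List String) : PySem.Set String :=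
  (PySem.List.enumerate vals 0).foldl
    (fun s p => if (PySem.List.slice vals none (some p.1)).contains p.2 then PySem.Set.add s p.2 else s)
    PySem.Set.empty

def find_duplicate_ma_email_py_alt (rows : List (List (String × String))) (key_ma : String) (key_email : String) : List String × List String :=
  let mas := (rows.map (fun r => PySem.Str.strip (PySem.Dict.getD (PySem.Dict.mk r) key_ma ""))).filter (fun m => m ≠ "")
  let emails := (rows.map (fun r => PySem.Str.lower (PySem.Str.strip (PySem.Dict.getD (PySem.Dict.mk r) key_email "")))).filter (fun e => e ≠ "")
  (pvPriorDups mas, pvPriorDups emails)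

-- ===== PRECONDITION & SPEC =====
def Spec_find_duplicate_ma_email_py (rows : List (List (String × String))) (key_ma : String) (key_email : String) (out : List String × List String) : Prop := out = find_duplicate_ma_email_py_alt rows key_ma key_email
instance (rows : List (List (String × String))) (key_ma : String) (key_email : String) (out : List String × List String) : Decidable (Spec_find_duplicate_ma_email_py rows key_ma key_email out) := by unfold Spec_find_duplicate_ma_email_py; infer_instance

-- ===== CLAIM (what is proved, stated in full; the proofs are below) =====
def Claim_equal_find_duplicate_ma_email_py : Prop := ∀ (rows : List (List (String × String))) (key_ma : String) (key_email : String), Dom_find_duplicate_ma_email_py rows key_ma key_email → Spec_find_duplicate_ma_email_py rows key_ma key_email (find_duplicate_ma_email_py rows key_ma key_email)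

-- ===== LEMMAS AND PROOFS =====

-- duplicate-accumulator recursion both proofs are reduced to
def pvDupAcc : List String → List String → PySem.Set String → PySem.Set String
  | _, [], s => s
  | pre, v :: vs, s => pvDupAcc (pre ++ [v]) vs (if pre.contains v then PySem.Set.add s v else s)

theorem pvSlice_to_clamp (xs : List String) (b : Int) :
    PySem.List.slice xs none (some b) = xs.take (PySem.List.clampIdx xs.length b) := by
  simp [PySem.List.slice]

theorem pvContains_ofList (l : List String) (x : String) :
    PySem.Set.contains (PySem.Set.ofList l) x = l.contains x := by
  simp [PySem.Set.contains_eq_listContains]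

theorem pvOfList_snoc (l : List String) (x : String) :
    PySem.Set.ofList (l ++ [x]) = PySem.Set.add (PySem.Set.ofList l) x := by
  rw [PySem.Set.ofList_eq_foldl, PySem.Set.ofList_eq_foldl, List.foldl_append]
  rfl

theorem pvPriorDups_go (vs : List String) : ∀ (pre : List String) (s : PySem.Set String),
    (PySem.List.enumerate vs (pre.length : Int)).foldl
      (fun s p => if (PySem.List.slice (pre ++ vs) none (some p.1)).contains p.2 then PySem.Set.add s p.2 else s) s
    = pvDupAcc pre vs s := by
  induction vs with
  | nil => intro pre s; simp [PySem.List.enumerate_nil, pvDupAcc]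
  | cons v vs ih =>
    intro pre s
    rw [PySem.List.enumerate_cons]
    simp only [List.foldl_cons, pvSlice_to_clamp]
    have hclamp : PySem.List.clampIdx (pre ++ v :: vs).length ((pre.length : Int)) = pre.length := by
      simp
    have htake : (pre ++ v :: vs).take pre.length = pre := by simp
    have hrest : pre ++ v :: vs = (pre ++ [v]) ++ vs := by simp
    have hlen : (pre.length : Int) + 1 = ((pre ++ [v]).length : Int) := by simp
    rw [hclamp, htake, hlen, hrest]
    simp only [← pvSlice_to_clamp]
    rw [ih (pre ++ [v])]
    simp [pvDupAcc]

theorem pvPriorDups_eq (vs : List String) : pvPriorDups vs = pvDupAcc [] vs PySem.Set.empty := by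
  have h := pvPriorDups_go vs [] PySem.Set.empty
  simp only [List.nil_append, List.length_nil, Nat.cast_zero] at h
  exact h

-- the normalized value streams (B's two list comprehensions)
def pvMas (key_ma : String) (rows : List (List (String × String))) : List String :=
  (rows.map (fun r => PySem.Str.strip (PySem.Dict.getD (PySem.Dict.mk r) key_ma ""))).filter (fun m => m ≠ "")
def pvEms (key_email : String) (rows : List (List (String × String))) : List String :=
  (rows.map (fun r => PySem.Str.lower (PySem.Str.strip (PySem.Dict.getD (PySem.Dict.mk r) key_email "")))).filter (fun e => e ≠ "")

theorem pvDupAcc_cons (pre : List String) (v : String) (vs : List String) (s : PySem.Set String) :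
    pvDupAcc pre (v :: vs) s = pvDupAcc (pre ++ [v]) vs (if pre.contains v then PySem.Set.add s v else s) := rfl

theorem pvLoopA (key_ma key_email : String) (rows : List (List (String × String))) :
    ∀ (preMa preEm : List String) (sMa sEm : PySem.Set String),
    rows.foldl (pvStepA key_ma key_email) (PySem.Set.ofList preMa, PySem.Set.ofList preEm, sMa, sEm)
    = (PySem.Set.ofList (preMa ++ pvMas key_ma rows), PySem.Set.ofList (preEm ++ pvEms key_email rows),
       pvDupAcc preMa (pvMas key_ma rows) sMa, pvDupAcc preEm (pvEms key_email rows) sEm) := by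
  induction rows with
  | nil => intro preMa preEm sMa sEm; simp [pvMas, pvEms, pvDupAcc]
  | cons r rows ih =>
    intro preMa preEm sMa sEm
    simp only [List.foldl_cons]
    set ma := PySem.Str.strip (PySem.Dict.getD (PySem.Dict.mk r) key_ma "") with hma
    set em := PySem.Str.lower (PySem.Str.strip (PySem.Dict.getD (PySem.Dict.mk r) key_email "")) with hem
    have hmas : pvMas key_ma (r :: rows) = (if ma ≠ "" then [ma] else []) ++ pvMas key_ma rows := by
      by_cases h : ma = "" <;> simp [pvMas, ← hma, h]
    have hems : pvEms key_email (r :: rows) = (if em ≠ "" then [em] else []) ++ pvEms key_email rows := by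
      by_cases h : em = "" <;> simp [pvEms, ← hem, h]
    have hstep : pvStepA key_ma key_email (PySem.Set.ofList preMa, PySem.Set.ofList preEm, sMa, sEm) r
        = (PySem.Set.ofList (preMa ++ (if ma ≠ "" then [ma] else [])),
           PySem.Set.ofList (preEm ++ (if em ≠ "" then [em] else [])),
           (if ma ≠ "" then (if preMa.contains ma then PySem.Set.add sMa ma else sMa) else sMa),
           (if em ≠ "" then (if preEm.contains em then PySem.Set.add sEm em else sEm) else sEm)) := by
      rw [pvStepA]
      simp only [← hma, ← hem, pvContains_ofList]
      by_cases h1 : ma = "" <;> by_cases h2 : em = "" <;>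
        simp only [h1, h2, ne_eq, not_true_eq_false, not_false_eq_true, if_true, if_false,
          List.append_nil] <;>
        simp [pvOfList_snoc, PySem.Set.add] <;>
        split_ifs <;> simp_all
    rw [hstep, hmas, hems]
    by_cases h1 : ma = "" <;> by_cases h2 : em = "" <;>
      simp only [h1, h2, ne_eq, not_true_eq_false, not_false_eq_true, if_true, if_false,
        List.append_nil, List.nil_append] <;>
      rw [ih] <;>
      simp [pvDupAcc_cons, List.append_assoc]

-- ===== VERDICT (by name: the statement is the Claim_ definition above) =====
theorem find_duplicate_ma_email_py_spec : Claim_equal_find_duplicate_ma_email_py := by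
  intro rows key_ma key_email _
  show find_duplicate_ma_email_py rows key_ma key_email = find_duplicate_ma_email_py_alt rows key_ma key_email
  rw [find_duplicate_ma_email_py, find_duplicate_ma_email_py_alt]
  rw [show ((PySem.Set.empty, PySem.Set.empty, PySem.Set.empty, PySem.Set.empty) :
      PySem.Set String × PySem.Set String × PySem.Set String × PySem.Set String)
      = (PySem.Set.ofList [], PySem.Set.ofList [], PySem.Set.empty, PySem.Set.empty) from rfl]
  rw [pvLoopA]
  simp [pvPriorDups_eq, pvMas, pvEms]
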